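-- pv_equiv track=rewrite | github.com/grapheneaffiliate/h4-polytopic-attention | solve_arc1_recovery.py | solve_007bbfb7
-- ===== SOURCE A (Python) =====
-- def solve_007bbfb7(grid):
--     """Each non-zero cell in 3x3 input becomes a copy of the grid; zero cells become 3x3 zeros."""
--     n = len(grid)
--     out = [[0]*(n*n) for _ in range(n*n)]
--     for r in range(n):
--         for c in range(n):
--             if grid[r][c] != 0:
--                 for dr in range(n):
--                     for dc in range(n):
--                         out[r*n+dr][c*n+dc] = grid[dr][dc]
--     return out
-- ===== SOURCE B (Python) =====
-- def solve_007bbfb7(grid):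
--     """Gather form: each output cell (i, j) reads the grid at quotient/remainder indices."""
--     n = len(grid)
--     return [[grid[i % n][j % n] if grid[i // n][j // n] != 0 else 0
--              for j in range(n * n)]
--             for i in range(n * n)]
-- ===== Notes on version B (the rewrite author's own statement) =====
-- stated objective: simpler
-- what changed: Replaces A's scatter (allocate a zero grid, then write n×n block copies under a nonzero guard) with a gather: one nested comprehension over output coordinates computing each cell directly from quotient/remainder indices.
import Mathlib
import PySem

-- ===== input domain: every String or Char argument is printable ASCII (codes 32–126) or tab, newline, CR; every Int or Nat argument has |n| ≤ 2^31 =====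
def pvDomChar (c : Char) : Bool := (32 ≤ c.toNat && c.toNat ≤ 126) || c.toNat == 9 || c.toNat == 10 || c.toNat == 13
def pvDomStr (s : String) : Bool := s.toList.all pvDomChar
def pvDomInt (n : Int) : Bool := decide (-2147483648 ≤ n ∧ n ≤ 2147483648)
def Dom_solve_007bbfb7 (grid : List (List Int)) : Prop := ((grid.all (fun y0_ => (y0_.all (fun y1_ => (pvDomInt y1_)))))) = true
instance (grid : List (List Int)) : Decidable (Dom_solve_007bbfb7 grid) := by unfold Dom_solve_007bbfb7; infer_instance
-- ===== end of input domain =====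

-- B changes decomposition only (scatter of guarded block copies → gather by a per-cell
-- quotient/remainder formula); same cost, not claimed faster. No argument is mutated.

-- ===== PORT A =====
-- 'out[i][j] = v' on a list of lists (index always in range in A's loop)
def pvSet2 (out : List (List Int)) (i j : Nat) (v : Int) : List (List Int) :=
  out.set i ((out.getD i []).set j v)

-- the two innermost loops of A: copy the whole grid into block (r, c)
def pvBlock (grid : List (List Int)) (n r c : Nat) (out : List (List Int)) : List (List Int) :=
  (List.range n).foldl (fun out dr =>
    (List.range n).foldl (fun out dc =>
      pvSet2 out (r*n+dr) (c*n+dc) ((grid.getD dr []).getD dc 0)) out) out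

def solve_007bbfb7 (grid : List (List Int)) : List (List Int) :=
  let n := grid.length
  (List.range n).foldl (fun out r =>
    (List.range n).foldl (fun out c =>
      if (grid.getD r []).getD c 0 ≠ 0 then pvBlock grid n r c out else out) out)
    (List.replicate (n*n) (List.replicate (n*n) (0:Int)))

-- ===== PORT B =====
def solve_007bbfb7_alt (grid : List (List Int)) : List (List Int) :=
  let n := grid.length
  (List.range (n*n)).map (fun i =>
    (List.range (n*n)).map (fun j =>
      if (grid.getD (i/n) []).getD (j/n) 0 ≠ 0 then (grid.getD (i%n) []).getD (j%n) 0 else 0))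

-- ===== PRECONDITION & SPEC =====
-- Pre_ excludes exactly the ragged grids (some row shorter than len(grid)) on which the
-- Python A raises IndexError (B raises there too).
def Pre_solve_007bbfb7 (grid : List (List Int)) : Prop :=
  ∀ row ∈ grid, grid.length ≤ row.length
instance (grid : List (List Int)) : Decidable (Pre_solve_007bbfb7 grid) := by
  unfold Pre_solve_007bbfb7; infer_instance

def pvWitness_solve_007bbfb7 : List (List Int) := [[0, 7], [2, 0]]

def Spec_solve_007bbfb7 (grid : List (List Int)) (out : List (List Int)) : Prop := out = solve_007bbfb7_alt grid
instance (grid : List (List Int)) (out : List (List Int)) : Decidable (Spec_solve_007bbfb7 grid out) := by unfold Spec_solve_007bbfb7; infer_instance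

-- ===== CLAIM (what is proved, stated in full; the proofs are below) =====
def Claim_equal_solve_007bbfb7 : Prop := ∀ (grid : List (List Int)), Dom_solve_007bbfb7 grid → Pre_solve_007bbfb7 grid → Spec_solve_007bbfb7 grid (solve_007bbfb7 grid)

-- ===== LEMMAS AND PROOFS =====

-- cell read, with Python's defaults erased by bounds in the proofs
def pvGet2 (out : List (List Int)) (i j : Nat) : Int := (out.getD i []).getD j 0

-- shape invariant of A's accumulator
def pvShape (n : Nat) (out : List (List Int)) : Prop :=
  out.length = n*n ∧ ∀ k, k < n*n → (out.getD k []).length = n*n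

theorem pvShape_set2 {n : Nat} {out : List (List Int)} (h : pvShape n out) (i j : Nat) (v : Int) :
    pvShape n (pvSet2 out i j v) := by
  obtain ⟨h1, h2⟩ := h
  refine ⟨by simp [pvSet2, h1], ?_⟩
  intro k hk
  by_cases hik : i = k
  · subst hik
    by_cases hlt : i < out.length
    · have := h2 i hk
      simp only [List.getD, List.getElem?_eq_getElem hlt, Option.getD_some] at this
      simp [pvSet2, List.getD, hlt, this]
    · simp [pvSet2, List.set_eq_of_length_le (by omega : out.length ≤ i)]
      exact h2 i hk
  · simp [pvSet2, List.getD, List.getElem?_set, hik]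
    exact h2 k hk

theorem pvGet2_set2 {out : List (List Int)} {p q : Nat} {v : Int} (i j : Nat) :
    pvGet2 (pvSet2 out p q v) i j =
      if p = i ∧ q = j ∧ p < out.length ∧ q < (out.getD p []).length then v
      else pvGet2 out i j := by
  by_cases hlt : p < out.length
  · by_cases hpi : p = i
    · subst hpi
      have hrow : (pvSet2 out p q v).getD p [] = (out.getD p []).set q v := by
        simp [pvSet2, List.getD, List.getElem?_set, hlt]
      have hgp : out.getD p [] = out[p] := by
        simp [List.getD, List.getElem?_eq_getElem hlt]
      by_cases hqj : q = j
      · subst hqj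
        by_cases hql : q < (out.getD p []).length
        · rw [hgp] at hql
          simp only [pvGet2]
          rw [hrow]
          simp [List.getD, List.getElem?_set, hgp, hlt, hql]
        · have h0 : (out.getD p []).set q v = out.getD p [] :=
            List.set_eq_of_length_le (by omega)
          rw [hgp] at hql
          simp only [pvGet2]
          rw [hrow, h0]
          simp [hgp, hlt, hql]
      · simp only [pvGet2]
        rw [hrow]
        simp [List.getD, List.getElem?_set, hgp, hqj, hlt]
    · have h1 : (pvSet2 out p q v).getD i [] = out.getD i [] := by
        simp [pvSet2, List.getD, List.getElem?_set, hpi]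
      simp only [pvGet2]
      rw [h1]
      simp [hpi]
  · have : pvSet2 out p q v = out := by
      simp [pvSet2, List.set_eq_of_length_le (by omega : out.length ≤ p)]
    simp [pvGet2, this, hlt]

-- quotient/remainder of a block coordinate
theorem pvDivMod (n c d : Nat) (hd : d < n) : (c*n+d)/n = c ∧ (c*n+d)%n = d := by
  have hn : 0 < n := by omega
  constructor
  · rw [Nat.add_comm, Nat.add_mul_div_right _ _ hn, Nat.div_eq_of_lt hd, Nat.zero_add]
  · rw [Nat.add_comm, Nat.add_mul_mod_self_right]
    exact Nat.mod_eq_of_lt hd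

theorem pvBlockLt {n c d : Nat} (hc : c < n) (hd : d < n) : c*n+d < n*n := by
  have h2 : c*n + n = (c+1)*n := by ring
  have h3 : (c+1)*n ≤ n*n := Nat.mul_le_mul_right n (by omega)
  omega

theorem pvShape_row (grid : List (List Int)) (n r c dr m : Nat) (out : List (List Int))
    (hS : pvShape n out) :
    pvShape n ((List.range m).foldl (fun out dc =>
        pvSet2 out (r*n+dr) (c*n+dc) ((grid.getD dr []).getD dc 0)) out) := by
  induction m generalizing out with
  | zero => simpa using hS
  | succ k ih =>
    rw [List.range_succ, List.foldl_append]
    exact pvShape_set2 (ih out hS) _ _ _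

-- innermost loop (over dc), fold up to m
theorem pvRow_get2 (grid : List (List Int)) (n r c dr : Nat)
    (hc : c < n) (hp : r*n+dr < n*n) : ∀ m, m ≤ n → ∀ out, pvShape n out → ∀ i j,
    pvGet2 ((List.range m).foldl (fun out dc =>
        pvSet2 out (r*n+dr) (c*n+dc) ((grid.getD dr []).getD dc 0)) out) i j =
      if i = r*n+dr ∧ j/n = c ∧ j%n < m then (grid.getD dr []).getD (j%n) 0
      else pvGet2 out i j := by
  intro m
  induction m with
  | zero => intro _ out hS i j; simp
  | succ k ih =>
    intro hm out hS i j
    have hk : k < n := by omega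
    have hS' := pvShape_row grid n r c dr k out hS
    have hq : c*n+k < n*n := pvBlockLt hc hk
    obtain ⟨hdk, hmk⟩ := pvDivMod n c k hk
    rw [List.range_succ, List.foldl_append, List.foldl_cons, List.foldl_nil, pvGet2_set2,
        ih (by omega) out hS i j, hS'.1, hS'.2 (r*n+dr) hp]
    by_cases h1 : r*n+dr = i
    · by_cases h2 : c*n+k = j
      · subst h1; subst h2
        rw [if_pos ⟨rfl, rfl, hp, hq⟩, if_pos ⟨rfl, hdk, by rw [hmk]; omega⟩, hmk]
      · rw [if_neg (fun h => h2 h.2.1)]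
        by_cases h3 : j/n = c ∧ j%n < k
        · rw [if_pos ⟨h1.symm, h3.1, h3.2⟩, if_pos ⟨h1.symm, h3.1, by omega⟩]
        · rw [if_neg (fun h => h3 ⟨h.2.1, h.2.2⟩), if_neg ?_]
          intro ⟨_, hb, hc'⟩
          rcases Nat.lt_succ_iff_lt_or_eq.mp hc' with h | h
          · exact h3 ⟨hb, h⟩
          · apply h2
            have hdm := Nat.div_add_mod j n
            rw [hb, h, Nat.mul_comm n c] at hdm
            exact hdm
    · rw [if_neg (fun h => h1 h.1), if_neg (fun h => h1 h.1.symm),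
          if_neg (fun h => h1 h.1.symm)]

theorem pvShape_blockAux (grid : List (List Int)) (n r c m : Nat) (out : List (List Int))
    (hS : pvShape n out) :
    pvShape n ((List.range m).foldl (fun out dr =>
      (List.range n).foldl (fun out dc =>
        pvSet2 out (r*n+dr) (c*n+dc) ((grid.getD dr []).getD dc 0)) out) out) := by
  induction m generalizing out with
  | zero => simpa using hS
  | succ k ih =>
    rw [List.range_succ, List.foldl_append, List.foldl_cons, List.foldl_nil]
    exact pvShape_row grid n r c k n _ (ih out hS)

theorem pvShape_block (grid : List (List Int)) (n r c : Nat) (out : List (List Int))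
    (hS : pvShape n out) : pvShape n (pvBlock grid n r c out) :=
  pvShape_blockAux grid n r c n out hS

-- both innermost loops (pvBlock), outer fold up to m rows of the block
theorem pvBlockAux_get2 (grid : List (List Int)) (n r c : Nat) (hn : 0 < n)
    (hr : r < n) (hc : c < n) : ∀ m, m ≤ n → ∀ out, pvShape n out → ∀ i j,
    pvGet2 ((List.range m).foldl (fun out dr =>
      (List.range n).foldl (fun out dc =>
        pvSet2 out (r*n+dr) (c*n+dc) ((grid.getD dr []).getD dc 0)) out) out) i j =
      if i/n = r ∧ i%n < m ∧ j/n = c then (grid.getD (i%n) []).getD (j%n) 0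
      else pvGet2 out i j := by
  intro m
  induction m with
  | zero => intro _ out hS i j; simp
  | succ k ih =>
    intro hm out hS i j
    have hk : k < n := by omega
    have hS' := pvShape_blockAux grid n r c k out hS
    have hp : r*n+k < n*n := pvBlockLt hr hk
    obtain ⟨hdk, hmk⟩ := pvDivMod n r k hk
    rw [List.range_succ, List.foldl_append, List.foldl_cons, List.foldl_nil,
        pvRow_get2 grid n r c k hc hp n (le_refl n) _ hS' i j,
        ih (by omega) out hS i j]
    have hjm : j%n < n := Nat.mod_lt j hn
    by_cases h1 : i = r*n+k
    · subst h1
      by_cases h2 : j/n = c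
      · rw [if_pos ⟨rfl, h2, hjm⟩, if_pos ⟨hdk, by rw [hmk]; omega, h2⟩, hmk]
      · rw [if_neg (fun h => h2 h.2.1), if_neg (fun h => h2 h.2.2),
            if_neg (fun h => h2 h.2.2)]
    · rw [if_neg (fun h => h1 h.1)]
      have h2 : ¬ (i/n = r ∧ i%n = k) := by
        intro ⟨ha, hb⟩
        apply h1
        have hdm := Nat.div_add_mod i n
        rw [ha, hb, Nat.mul_comm n r] at hdm
        exact hdm.symm
      by_cases h3 : i/n = r ∧ i%n < k ∧ j/n = c
      · rw [if_pos h3, if_pos ⟨h3.1, by omega, h3.2.2⟩]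
      · rw [if_neg h3, if_neg ?_]
        intro ⟨ha, hb, hc'⟩
        rcases Nat.lt_succ_iff_lt_or_eq.mp hb with h | h
        · exact h3 ⟨ha, h, hc'⟩
        · exact h2 ⟨ha, h⟩

theorem pvBlock_get2 (grid : List (List Int)) (n r c : Nat) (hn : 0 < n)
    (hr : r < n) (hc : c < n) (out : List (List Int)) (hS : pvShape n out) (i j : Nat) :
    pvGet2 (pvBlock grid n r c out) i j =
      if i/n = r ∧ j/n = c then (grid.getD (i%n) []).getD (j%n) 0
      else pvGet2 out i j := by
  have := pvBlockAux_get2 grid n r c hn hr hc n (le_refl n) out hS i j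
  rw [pvBlock, this]
  have him : i%n < n := Nat.mod_lt i hn
  by_cases h1 : i/n = r <;> by_cases h2 : j/n = c <;> simp [h1, h2, him]

theorem pvShape_col (grid : List (List Int)) (n r m : Nat) (out : List (List Int))
    (hS : pvShape n out) :
    pvShape n ((List.range m).foldl (fun out c =>
        if (grid.getD r []).getD c 0 ≠ 0 then pvBlock grid n r c out else out) out) := by
  induction m generalizing out with
  | zero => simpa using hS
  | succ k ih =>
    rw [List.range_succ, List.foldl_append, List.foldl_cons, List.foldl_nil]
    by_cases h : (grid.getD r []).getD k 0 ≠ 0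
    · simp only [if_pos h]
      exact pvShape_block grid n r k _ (ih out hS)
    · simp only [if_neg h]
      exact ih out hS

-- middle loop over c, fold up to m
theorem pvCol_get2 (grid : List (List Int)) (n r : Nat) (hn : 0 < n)
    (hr : r < n) : ∀ m, m ≤ n → ∀ out, pvShape n out → ∀ i j,
    pvGet2 ((List.range m).foldl (fun out c =>
        if (grid.getD r []).getD c 0 ≠ 0 then pvBlock grid n r c out else out) out) i j =
      if i/n = r ∧ j/n < m ∧ (grid.getD r []).getD (j/n) 0 ≠ 0
      then (grid.getD (i%n) []).getD (j%n) 0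
      else pvGet2 out i j := by
  intro m
  induction m with
  | zero => intro _ out hS i j; simp
  | succ k ih =>
    intro hm out hS i j
    have hk : k < n := by omega
    have hS' := pvShape_col grid n r k out hS
    rw [List.range_succ, List.foldl_append, List.foldl_cons, List.foldl_nil]
    by_cases hg : (grid.getD r []).getD k 0 ≠ 0
    · rw [if_pos hg, pvBlock_get2 grid n r k hn hr hk _ hS' i j, ih (by omega) out hS i j]
      by_cases h1 : i/n = r
      · by_cases h2 : j/n = k
        · rw [if_pos ⟨h1, h2⟩, if_pos ⟨h1, by omega, by rw [h2]; exact hg⟩]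
        · rw [if_neg (fun h => h2 h.2)]
          by_cases h3 : j/n < k ∧ (grid.getD r []).getD (j/n) 0 ≠ 0
          · rw [if_pos ⟨h1, h3.1, h3.2⟩, if_pos ⟨h1, by omega, h3.2⟩]
          · rw [if_neg (fun h => h3 ⟨h.2.1, h.2.2⟩), if_neg ?_]
            intro ⟨_, hb, hc'⟩
            rcases Nat.lt_succ_iff_lt_or_eq.mp hb with h | h
            · exact h3 ⟨h, hc'⟩
            · exact h2 h
      · rw [if_neg (fun h => h1 h.1), if_neg (fun h => h1 h.1), if_neg (fun h => h1 h.1)]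
    · rw [if_neg hg, ih (by omega) out hS i j]
      rw [not_not] at hg
      by_cases h1 : i/n = r
      · by_cases h3 : j/n < k ∧ (grid.getD r []).getD (j/n) 0 ≠ 0
        · rw [if_pos ⟨h1, h3.1, h3.2⟩, if_pos ⟨h1, by omega, h3.2⟩]
        · rw [if_neg (fun h => h3 ⟨h.2.1, h.2.2⟩), if_neg ?_]
          intro ⟨_, hb, hc'⟩
          rcases Nat.lt_succ_iff_lt_or_eq.mp hb with h | h
          · exact h3 ⟨h, hc'⟩
          · rw [h] at hc'; exact hc' hg
      · rw [if_neg (fun h => h1 h.1), if_neg (fun h => h1 h.1)]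

theorem pvShape_rows (grid : List (List Int)) (n m : Nat) (out : List (List Int))
    (hS : pvShape n out) :
    pvShape n ((List.range m).foldl (fun out r =>
        (List.range n).foldl (fun out c =>
          if (grid.getD r []).getD c 0 ≠ 0 then pvBlock grid n r c out else out) out) out) := by
  induction m generalizing out with
  | zero => simpa using hS
  | succ k ih =>
    rw [List.range_succ, List.foldl_append, List.foldl_cons, List.foldl_nil]
    exact pvShape_col grid n k n _ (ih out hS)

-- outer loop over r, fold up to m
theorem pvRows_get2 (grid : List (List Int)) (n : Nat) (hn : 0 < n) :
    ∀ m, m ≤ n → ∀ out, pvShape n out → ∀ i j,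
    pvGet2 ((List.range m).foldl (fun out r =>
        (List.range n).foldl (fun out c =>
          if (grid.getD r []).getD c 0 ≠ 0 then pvBlock grid n r c out else out) out) out) i j =
      if i/n < m ∧ j/n < n ∧ (grid.getD (i/n) []).getD (j/n) 0 ≠ 0
      then (grid.getD (i%n) []).getD (j%n) 0
      else pvGet2 out i j := by
  intro m
  induction m with
  | zero => intro _ out hS i j; simp
  | succ k ih =>
    intro hm out hS i j
    have hk : k < n := by omega
    have hS' := pvShape_rows grid n k out hS
    rw [List.range_succ, List.foldl_append, List.foldl_cons, List.foldl_nil,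
        pvCol_get2 grid n k hn hk n (le_refl n) _ hS' i j, ih (by omega) out hS i j]
    by_cases h1 : i/n = k
    · by_cases h2 : j/n < n ∧ (grid.getD (i/n) []).getD (j/n) 0 ≠ 0
      · rw [if_pos ⟨h1, h2.1, by rw [← h1]; exact h2.2⟩, if_pos ⟨by omega, h2.1, h2.2⟩]
      · rw [if_neg (fun h => h2 ⟨h.2.1, by rw [h1]; exact h.2.2⟩), if_neg ?_, if_neg ?_]
        · intro ⟨_, hb, hc'⟩; exact h2 ⟨hb, hc'⟩
        · intro ⟨ha, hb, hc'⟩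
          exact h2 ⟨hb, hc'⟩
    · rw [if_neg (fun h => h1 h.1)]
      by_cases h3 : i/n < k ∧ j/n < n ∧ (grid.getD (i/n) []).getD (j/n) 0 ≠ 0
      · rw [if_pos h3, if_pos ⟨by omega, h3.2.1, h3.2.2⟩]
      · rw [if_neg h3, if_neg ?_]
        intro ⟨ha, hb, hc'⟩
        rcases Nat.lt_succ_iff_lt_or_eq.mp ha with h | h
        · exact h3 ⟨h, hb, hc'⟩
        · exact h1 h

theorem pvGet2_init (n i j : Nat) :
    pvGet2 (List.replicate (n*n) (List.replicate (n*n) (0:Int))) i j = 0 := by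
  simp only [pvGet2, List.getD, List.getElem?_replicate]
  split_ifs with hi
  · simp only [Option.getD_some, List.getElem?_replicate]
    split_ifs <;> simp
  · simp

theorem pvShape_init (n : Nat) : pvShape n (List.replicate (n*n) (List.replicate (n*n) (0:Int))) := by
  refine ⟨by simp, ?_⟩
  intro k hk
  simp [List.getD, List.getElem?_replicate, hk]

theorem pvGetD_eq_getElem {α : Type} (l : List α) (d : α) (i : Nat) (h : i < l.length) :
    l.getD i d = l[i] := by
  simp [List.getD, List.getElem?_eq_getElem h]

-- ===== VERDICT (by name: the statement is the Claim_ definition above) =====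
theorem solve_007bbfb7_spec : Claim_equal_solve_007bbfb7 := by
  intro grid _ _
  unfold Spec_solve_007bbfb7
  by_cases h0 : grid.length = 0
  · have hnil : grid = [] := List.eq_nil_of_length_eq_zero h0
    subst hnil
    rfl
  · have hn : 0 < grid.length := by omega
    set n := grid.length with hndef
    have hAeq : solve_007bbfb7 grid = (List.range n).foldl (fun out r =>
        (List.range n).foldl (fun out c =>
          if (grid.getD r []).getD c 0 ≠ 0 then pvBlock grid n r c out else out) out)
        (List.replicate (n*n) (List.replicate (n*n) (0:Int))) := rfl
    have hSA := pvShape_rows grid n n _ (pvShape_init n)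
    have hA : ∀ i j, pvGet2 (solve_007bbfb7 grid) i j =
        if i/n < n ∧ j/n < n ∧ (grid.getD (i/n) []).getD (j/n) 0 ≠ 0
        then (grid.getD (i%n) []).getD (j%n) 0 else 0 := by
      intro i j
      rw [hAeq, pvRows_get2 grid n hn n (le_refl n) _ (pvShape_init n) i j, pvGet2_init]
    have hlenA : (solve_007bbfb7 grid).length = n*n := by rw [hAeq]; exact hSA.1
    have hrowA : ∀ k, k < n*n → ((solve_007bbfb7 grid).getD k []).length = n*n := by
      intro k hk; rw [hAeq]; exact hSA.2 k hk
    have hlenB : (solve_007bbfb7_alt grid).length = n*n := by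
      simp only [solve_007bbfb7_alt, List.length_map, List.length_range]
      rw [← hndef]
    apply List.ext_getElem
    · rw [hlenA, hlenB]
    · intro i hi1 hi2
      have hi : i < n*n := by omega
      have hBrow : (solve_007bbfb7_alt grid)[i] = (List.range (n*n)).map (fun j =>
          if (grid.getD (i/n) []).getD (j/n) 0 ≠ 0
          then (grid.getD (i%n) []).getD (j%n) 0 else 0) := by
        simp only [solve_007bbfb7_alt]
        rw [List.getElem_map, List.getElem_range]
      rw [hBrow]
      apply List.ext_getElem
      · rw [List.length_map, List.length_range,
            ← pvGetD_eq_getElem _ [] i hi1, hrowA i hi]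
      · intro j hj1 hj2
        have hj : j < n*n := by
          rw [← pvGetD_eq_getElem _ [] i hi1, hrowA i hi] at hj1
          exact hj1
        have hAcell : (solve_007bbfb7 grid)[i][j] = pvGet2 (solve_007bbfb7 grid) i j := by
          rw [pvGet2, pvGetD_eq_getElem _ [] i hi1, pvGetD_eq_getElem _ 0 j hj1]
        rw [hAcell, hA i j]
        simp only [List.getElem_map, List.getElem_range]
        have hdi : i/n < n := (Nat.div_lt_iff_lt_mul hn).mpr hi
        have hdj : j/n < n := (Nat.div_lt_iff_lt_mul hn).mpr hj
        by_cases hc : (grid.getD (i/n) []).getD (j/n) 0 ≠ 0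
        · rw [if_pos ⟨hdi, hdj, hc⟩, if_pos hc]
        · rw [if_neg (fun h => hc h.2.2), if_neg hc]
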